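-- pv_equiv track=rewrite | github.com/WehkawngZahkungShiengkat/CardGame_War | Python_OOP_Project.py | winHand2
-- ===== SOURCE A (Python) =====
-- def winHand2(in1,in2,betL):
--     a,b = in1
--     c,d = in2
--     pp = []
--     pcp = []
--     Rnk =["A","K","Q","J","10","9","8","7","6","5","4","3","2"]
--     for r in Rnk:
--         if b == r and d == r:
--             for hdsc in ["H","D","S","C"]:
--                 if a == hdsc:
--                     pp = [in1,in2] + betL
--                     break
--                 elif c == hdsc:
--                     pcp = [in1,in2] + betL
--                     break
--         elif b == r:
--             pp = [in1,in2] + betL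
--             break
--         elif d == r:
--             pcp = [in1,in2] + betL
--             break
--
--     return pp,pcp
-- ===== SOURCE B (Python) =====
-- def winHand2(in1, in2, betL):
--     RANKS = ["A", "K", "Q", "J", "10", "9", "8", "7", "6", "5", "4", "3", "2"]
--     SUITS = ["H", "D", "S", "C"]
--     a, b = in1
--     c, d = in2
--     rb = RANKS.index(b) if b in RANKS else None
--     rd = RANKS.index(d) if d in RANKS else None
--     pot = [in1, in2] + betL
--     if rb is None and rd is None:
--         return [], []
--     if rb == rd:
--         sa = SUITS.index(a) if a in SUITS else None
--         sc = SUITS.index(c) if c in SUITS else None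
--         if sa is not None and (sc is None or sa <= sc):
--             return pot, []
--         if sc is not None:
--             return [], pot
--         return [], []
--     if rd is None or (rb is not None and rb < rd):
--         return pot, []
--     return [], pot
-- ===== Notes on version B (the rewrite author's own statement) =====
-- stated objective: simpler
-- what changed: Replaced A's nested rank/suit scan loops with breaks and mutable pile state by two guarded list.index lookups compared arithmetically (rank index, then suit index as tie-break), with the invalid-rank/suit cases handled by explicit None checks.
import Mathlib
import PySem

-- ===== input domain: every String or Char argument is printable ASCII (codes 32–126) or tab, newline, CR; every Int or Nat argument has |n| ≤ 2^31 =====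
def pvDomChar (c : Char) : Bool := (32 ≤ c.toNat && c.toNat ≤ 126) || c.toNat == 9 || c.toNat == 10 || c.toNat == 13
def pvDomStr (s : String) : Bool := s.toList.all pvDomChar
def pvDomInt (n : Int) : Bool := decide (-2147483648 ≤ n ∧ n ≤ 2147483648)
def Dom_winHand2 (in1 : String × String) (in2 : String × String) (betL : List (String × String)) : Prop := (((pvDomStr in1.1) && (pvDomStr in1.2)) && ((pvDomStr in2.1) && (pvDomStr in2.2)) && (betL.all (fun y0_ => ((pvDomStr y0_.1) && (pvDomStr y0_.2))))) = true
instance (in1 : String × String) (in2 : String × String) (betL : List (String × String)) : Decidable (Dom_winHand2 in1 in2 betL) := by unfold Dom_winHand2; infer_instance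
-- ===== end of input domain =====

-- B replaces A's nested rank/suit scan loops (with breaks and mutable piles) by rank/suit index
-- lookups compared arithmetically; objective: simpler, same cost.

-- ===== PORT A =====
-- inner 'for hdsc in ["H","D","S","C"]' loop of A: first suit equal to a or c decides, break
def pvInnerSuit (in1 in2 : String × String) (betL : List (String × String)) (a c : String) :
    List String → (List (String × String)) × (List (String × String)) →
    (List (String × String)) × (List (String × String))
  | [], st => st
  | h :: t, st =>
    if a == h then ([in1, in2] ++ betL, st.2)
    else if c == h then (st.1, [in1, in2] ++ betL)
    else pvInnerSuit in1 in2 betL a c t st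

-- outer 'for r in Rnk' loop of A, carrying the (pp, pcp) state
def pvOuterRank (in1 in2 : String × String) (betL : List (String × String)) (a b c d : String) :
    List String → (List (String × String)) × (List (String × String)) →
    (List (String × String)) × (List (String × String))
  | [], st => st
  | r :: rs, st =>
    if b == r && d == r then
      pvOuterRank in1 in2 betL a b c d rs (pvInnerSuit in1 in2 betL a c ["H", "D", "S", "C"] st)
    else if b == r then ([in1, in2] ++ betL, st.2)
    else if d == r then (st.1, [in1, in2] ++ betL)
    else pvOuterRank in1 in2 betL a b c d rs st

def winHand2 (in1 : String × String) (in2 : String × String) (betL : List (String × String)) : (List (String × String)) × (List (String × String)) :=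
  pvOuterRank in1 in2 betL in1.1 in1.2 in2.1 in2.2
    ["A", "K", "Q", "J", "10", "9", "8", "7", "6", "5", "4", "3", "2"] ([], [])

-- ===== PORT B =====
def winHand2_alt (in1 : String × String) (in2 : String × String) (betL : List (String × String)) : (List (String × String)) × (List (String × String)) :=
  let ranks : List String := ["A", "K", "Q", "J", "10", "9", "8", "7", "6", "5", "4", "3", "2"]
  let suits : List String := ["H", "D", "S", "C"]
  let rb := PySem.List.index? ranks in1.2
  let rd := PySem.List.index? ranks in2.2
  let pot := [in1, in2] ++ betL
  if rb.isNone && rd.isNone then ([], [])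
  else if rb == rd then
    -- equal valid ranks: tie broken on suit index, a's checked first
    match PySem.List.index? suits in1.1, PySem.List.index? suits in2.1 with
    | some _, none => (pot, [])
    | some i, some j => if i ≤ j then (pot, []) else ([], pot)
    | none, some _ => ([], pot)
    | none, none => ([], [])
  else
    match rb, rd with
    | _, none => (pot, [])
    | some i, some j => if i < j then (pot, []) else ([], pot)
    | none, _ => ([], pot)

-- ===== PRECONDITION & SPEC =====
def Spec_winHand2 (in1 : String × String) (in2 : String × String) (betL : List (String × String)) (out : (List (String × String)) × (List (String × String))) : Prop := out = winHand2_alt in1 in2 betL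
instance (in1 : String × String) (in2 : String × String) (betL : List (String × String)) (out : (List (String × String)) × (List (String × String))) : Decidable (Spec_winHand2 in1 in2 betL out) := by unfold Spec_winHand2; infer_instance

-- ===== CLAIM (what is proved, stated in full; the proofs are below) =====
def Claim_equal_winHand2 : Prop := ∀ (in1 : String × String) (in2 : String × String) (betL : List (String × String)), Dom_winHand2 in1 in2 betL → Spec_winHand2 in1 in2 betL (winHand2 in1 in2 betL)

-- ===== LEMMAS AND PROOFS =====

-- the inner suit loop returns according to the first index at which a or c occurs
theorem pvInnerSuit_spec (in1 in2 : String × String) (betL : List (String × String))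
    (a c : String) (ss : List String) (st : (List (String × String)) × (List (String × String))) :
    pvInnerSuit in1 in2 betL a c ss st =
      match PySem.List.index? ss a, PySem.List.index? ss c with
      | some i, some j => if i ≤ j then ([in1, in2] ++ betL, st.2) else (st.1, [in1, in2] ++ betL)
      | some _, none => ([in1, in2] ++ betL, st.2)
      | none, some _ => (st.1, [in1, in2] ++ betL)
      | none, none => st := by
  induction ss with
  | nil => simp [pvInnerSuit, PySem.List.index?]
  | cons h t ih =>
    by_cases ha : a = h
    · subst ha
      rw [pvInnerSuit, if_pos (by simp), PySem.List.index?_cons_self]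
      by_cases hc : c = a
      · subst hc; rw [PySem.List.index?_cons_self]; simp
      · rw [PySem.List.index?_cons_of_ne _ (Ne.symm hc)]
        cases PySem.List.index? t c <;> simp
    · rw [pvInnerSuit, if_neg (by simpa using ha),
        PySem.List.index?_cons_of_ne _ (Ne.symm ha)]
      by_cases hc : c = h
      · subst hc
        rw [if_pos (by simp), PySem.List.index?_cons_self]
        cases PySem.List.index? t a <;> simp
      · rw [if_neg (by simpa using hc),
          PySem.List.index?_cons_of_ne _ (Ne.symm hc), ih]
        cases PySem.List.index? t a <;> cases PySem.List.index? t c <;> simp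

-- the outer rank loop on a duplicate-free rank list returns according to the ranks' indices
theorem pvOuterRank_spec (in1 in2 : String × String) (betL : List (String × String))
    (a b c d : String) (rs : List String) (hnd : rs.Nodup)
    (st : (List (String × String)) × (List (String × String))) :
    pvOuterRank in1 in2 betL a b c d rs st =
      match PySem.List.index? rs b, PySem.List.index? rs d with
      | none, none => st
      | some i, some j =>
          if i = j then pvInnerSuit in1 in2 betL a c ["H", "D", "S", "C"] st
          else if i < j then ([in1, in2] ++ betL, st.2) else (st.1, [in1, in2] ++ betL)
      | some _, none => ([in1, in2] ++ betL, st.2)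
      | none, some _ => (st.1, [in1, in2] ++ betL) := by
  induction rs generalizing st with
  | nil => simp [pvOuterRank, PySem.List.index?]
  | cons r rs ih =>
    rcases List.nodup_cons.mp hnd with ⟨hr, hrs⟩
    by_cases hb : b = r <;> by_cases hd : d = r
    · subst hb; subst hd
      rw [pvOuterRank, if_pos (by simp), PySem.List.index?_cons_self, ih hrs]
      rw [(PySem.List.index?_eq_none_iff rs _).mpr hr]
      simp
    · subst hb
      rw [pvOuterRank, if_neg (by simpa using hd), if_pos (by simp),
        PySem.List.index?_cons_self, PySem.List.index?_cons_of_ne _ (Ne.symm hd)]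
      cases PySem.List.index? rs d <;> simp
    · subst hd
      rw [pvOuterRank, if_neg (by simpa using hb), if_neg (by simpa using hb), if_pos (by simp),
        PySem.List.index?_cons_self, PySem.List.index?_cons_of_ne _ (Ne.symm hb)]
      cases PySem.List.index? rs b <;> simp
    · rw [pvOuterRank, if_neg (by simpa using fun h _ => hb h), if_neg (by simpa using hb),
        if_neg (by simpa using hd), ih hrs,
        PySem.List.index?_cons_of_ne _ (Ne.symm hb),
        PySem.List.index?_cons_of_ne _ (Ne.symm hd)]
      cases PySem.List.index? rs b <;> cases PySem.List.index? rs d <;> simp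

-- ===== VERDICT (by name: the statement is the Claim_ definition above) =====
theorem winHand2_spec : Claim_equal_winHand2 := by
  intro in1 in2 betL _
  unfold Spec_winHand2
  rw [winHand2, pvOuterRank_spec in1 in2 betL in1.1 in1.2 in2.1 in2.2 _ (by decide),
    pvInnerSuit_spec]
  simp only [winHand2_alt]
  generalize PySem.List.index? ["A", "K", "Q", "J", "10", "9", "8", "7", "6", "5", "4", "3", "2"] in1.2 = rb
  generalize PySem.List.index? ["A", "K", "Q", "J", "10", "9", "8", "7", "6", "5", "4", "3", "2"] in2.2 = rd
  generalize PySem.List.index? ["H", "D", "S", "C"] in1.1 = sa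
  generalize PySem.List.index? ["H", "D", "S", "C"] in2.1 = sc
  cases rb with
  | none => cases rd <;> simp
  | some i =>
    cases rd with
    | none => simp
    | some j =>
      by_cases hij : i = j
      · subst hij
        cases sa <;> cases sc <;> simp
      · simp [hij]
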